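-- pv_equiv track=rewrite | github.com/Leon-Ware/PhishPunch | analysis.py | max_delimiters
-- ===== SOURCE A (Python) =====
-- def max_delimiters(data):
--     """
--     :param data: List of tokens
--     :return: Integer max count
--     """
--
--     # Delimiters used in PhishDef paper
--     delimiters = [".", "-", "_", "/", "?", "=", "&"]
--
--     # Count the number of delimiters present
--     max_count = 0
--     for i in range(len(data)):
--         cur_count = 0
--         for j in range(len(delimiters)):
--             cur_count += data[i].count(delimiters[j])
--         if cur_count > max_count:
--             max_count = cur_count
--
--     return max_count
-- ===== SOURCE B (Python) =====
-- def max_delimiters(data):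
--     """
--     :param data: List of tokens
--     :return: Integer max count
--     """
--     delims = set(".-_/?=&")
--     best = 0
--     for token in data:
--         count = sum(ch in delims for ch in token)
--         if count > best:
--             best = count
--     return best
-- ===== Notes on version B (the rewrite author's own statement) =====
-- stated objective: faster
-- what changed: Replaces the seven per-delimiter .count() scans of each token (indexed nested loops over the delimiter list) with a single character-level pass per token that sums membership in a delimiter set, keeping a running maximum over direct iteration of the tokens.
import Mathlib
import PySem

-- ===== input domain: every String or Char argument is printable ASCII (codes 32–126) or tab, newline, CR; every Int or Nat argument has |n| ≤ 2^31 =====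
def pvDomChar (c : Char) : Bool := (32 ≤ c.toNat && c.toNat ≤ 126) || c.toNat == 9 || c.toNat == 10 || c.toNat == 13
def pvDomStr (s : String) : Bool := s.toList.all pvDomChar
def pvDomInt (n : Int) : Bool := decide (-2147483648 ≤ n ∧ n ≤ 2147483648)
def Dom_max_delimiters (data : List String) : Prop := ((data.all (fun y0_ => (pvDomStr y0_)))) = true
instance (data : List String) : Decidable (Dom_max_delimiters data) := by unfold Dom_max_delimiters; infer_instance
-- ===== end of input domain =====

-- B replaces A's seven per-delimiter .count() scans per token with one character pass
-- summing membership in a delimiter set (idiomatic; same result, proved equal).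


-- ===== PORT A =====
def max_delimiters (data : List String) : Int :=
  let delimiters : List String := [".", "-", "_", "/", "?", "=", "&"]
  (PySem.List.pyRange 0 (PySem.List.len data) 1).foldl
    (fun max_count i =>
      let cur_count : Int :=
        (PySem.List.pyRange 0 (PySem.List.len delimiters) 1).foldl
          (fun cur_count j =>
            cur_count + (PySem.Str.count (PySem.List.pyGetD data i "") (PySem.List.pyGetD delimiters j "") : Int))
          0
      if cur_count > max_count then cur_count else max_count)
    0

-- ===== PORT B =====
def pvDelims : PySem.Set Char := PySem.Set.ofList ".-_/?=&".toList

def max_delimiters_alt (data : List String) : Int :=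
  data.foldl
    (fun best token =>
      let count : Int := (token.toList.map (fun ch => if ch ∈ pvDelims then (1 : Int) else 0)).sum
      if count > best then count else best)
    0

-- ===== PRECONDITION & SPEC =====
def Spec_max_delimiters (data : List String) (out : Int) : Prop := out = max_delimiters_alt data
instance (data : List String) (out : Int) : Decidable (Spec_max_delimiters data out) := by unfold Spec_max_delimiters; infer_instance

-- ===== CLAIM (what is proved, stated in full; the proofs are below) =====
def Claim_equal_max_delimiters : Prop := ∀ (data : List String), Dom_max_delimiters data → Spec_max_delimiters data (max_delimiters data)

-- ===== LEMMAS AND PROOFS =====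

-- PySem.Chars.count with a single-character needle is List.count.
lemma count_go_single (c : Char) : ∀ (fuel : Nat) (l : List Char) (acc : Nat),
    l.length ≤ fuel → PySem.Chars.count.go [c] fuel l acc = acc + l.count c := by
  intro fuel
  induction fuel with
  | zero =>
    intro l acc h
    interval_cases hl : l.length
    · rw [List.length_eq_zero_iff] at hl; subst hl
      rw [PySem.Chars.count.go.eq_def]; simp
  | succ n ih =>
    intro l acc h
    cases l with
    | nil => rw [PySem.Chars.count.go.eq_def]; simp
    | cons a t =>
      rw [PySem.Chars.count.go.eq_def]
      simp only [List.isPrefixOf_cons₂, List.isPrefixOf_nil_left, Bool.and_true, List.length_cons] at *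
      by_cases hac : c = a
      · subst hac
        rw [if_pos (by simp)]
        simp only [List.drop_succ_cons, List.length_nil, List.drop_zero]
        rw [ih t (acc + 1) (by omega)]
        simp
        omega
      · have : (c == a) = false := by simp [hac]
        simp only [this, Bool.false_eq_true, if_false]
        rw [ih t acc (by omega)]
        simp [List.count_cons]
        intro h'; exact absurd h'.symm hac

lemma str_count_single (s : String) (c : Char) :
    PySem.Str.count s (String.ofList [c]) = s.toList.count c := by
  rw [PySem.Str.count_eq, String.toList_ofList]
  unfold PySem.Chars.count
  simp only [List.isEmpty_cons, if_false, Bool.false_eq_true]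
  simpa using count_go_single c s.toList.length s.toList 0 le_rfl

-- the per-token core: the seven single-delimiter counts sum to the membership count
lemma token_count (cs : List Char) :
    ((0 : Int) + cs.count '.' + cs.count '-' + cs.count '_' + cs.count '/'
      + cs.count '?' + cs.count '=' + cs.count '&')
    = (cs.map (fun ch => if ch ∈ pvDelims then (1 : Int) else 0)).sum := by
  induction cs with
  | nil => simp
  | cons a t ih =>
    simp only [List.count_cons, List.map_cons, List.sum_cons]
    push_cast
    rw [← ih]
    have hmem : (a ∈ pvDelims) ↔ (a = '.' ∨ a = '-' ∨ a = '_' ∨ a = '/' ∨ a = '?' ∨ a = '=' ∨ a = '&') := by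
      rw [pvDelims, PySem.Set.mem_ofList]
      simp
    by_cases h : a ∈ pvDelims
    · rw [if_pos h]
      rw [hmem] at h
      rcases h with h|h|h|h|h|h|h <;> subst h <;> simp <;> ring
    · rw [if_neg h]
      rw [hmem] at h
      push Not at h
      obtain ⟨h1,h2,h3,h4,h5,h6,h7⟩ := h
      simp [beq_iff_eq, h1, h2, h3, h4, h5, h6, h7]

-- the inner delimiter loop of A equals B's per-character membership sum
lemma inner_eq (s : String) :
    (PySem.List.pyRange 0 (PySem.List.len ([".", "-", "_", "/", "?", "=", "&"] : List String)) 1).foldl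
      (fun cur_count j =>
        cur_count + (PySem.Str.count s (PySem.List.pyGetD ([".", "-", "_", "/", "?", "=", "&"] : List String) j "") : Int)) 0
    = (s.toList.map (fun ch => if ch ∈ pvDelims then (1 : Int) else 0)).sum := by
  have hr : PySem.List.pyRange 0 (PySem.List.len ([".", "-", "_", "/", "?", "=", "&"] : List String)) 1
      = [0, 1, 2, 3, 4, 5, 6] := by decide
  have g0 : PySem.List.pyGetD ([".", "-", "_", "/", "?", "=", "&"] : List String) 0 "" = String.ofList ['.'] := by decide
  have g1 : PySem.List.pyGetD ([".", "-", "_", "/", "?", "=", "&"] : List String) 1 "" = String.ofList ['-'] := by decide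
  have g2 : PySem.List.pyGetD ([".", "-", "_", "/", "?", "=", "&"] : List String) 2 "" = String.ofList ['_'] := by decide
  have g3 : PySem.List.pyGetD ([".", "-", "_", "/", "?", "=", "&"] : List String) 3 "" = String.ofList ['/'] := by decide
  have g4 : PySem.List.pyGetD ([".", "-", "_", "/", "?", "=", "&"] : List String) 4 "" = String.ofList ['?'] := by decide
  have g5 : PySem.List.pyGetD ([".", "-", "_", "/", "?", "=", "&"] : List String) 5 "" = String.ofList ['='] := by decide
  have g6 : PySem.List.pyGetD ([".", "-", "_", "/", "?", "=", "&"] : List String) 6 "" = String.ofList ['&'] := by decide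
  rw [hr]
  simp only [List.foldl, g0, g1, g2, g3, g4, g5, g6, str_count_single]
  exact token_count s.toList

-- ===== VERDICT (by name: the statement is the Claim_ definition above) =====
theorem max_delimiters_spec : Claim_equal_max_delimiters := by
  unfold Claim_equal_max_delimiters
  intro data _
  unfold Spec_max_delimiters max_delimiters max_delimiters_alt
  simp only [inner_eq]
  exact PySem.List.foldl_pyRange_zero_pyGetD data ""
    (fun max_count token =>
      let cur_count : Int := (token.toList.map (fun ch => if ch ∈ pvDelims then (1 : Int) else 0)).sum
      if cur_count > max_count then cur_count else max_count) 0
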